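-- pv_equiv track=rewrite | github.com/Ashel7577/Professional-Password-Cracker | src/advanced_cracker.py | _expand_mask
-- ===== SOURCE A (Python) =====
-- def _expand_mask(mask):
--     """Expand mask pattern to character set"""
--     charsets = {
--         '?l': 'abcdefghijklmnopqrstuvwxyz',
--         '?u': 'ABCDEFGHIJKLMNOPQRSTUVWXYZ',
--         '?d': '0123456789',
--         '?s': '!@#$%^&*()_+-=[]{}|;:,.<>?',
--         '?a': 'abcdefghijklmnopqrstuvwxyzABCDEFGHIJKLMNOPQRSTUVWXYZ0123456789!@#$%^&*()_+-=[]{}|;:,.<>?'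
--     }
--
--     result = ''
--     i = 0
--     while i < len(mask):
--         if mask[i] == '?' and i+1 < len(mask):
--             char_type = mask[i+1]
--             if char_type in charsets:
--                 result += charsets[char_type]
--                 i += 2
--             else:
--                 result += mask[i]
--                 i += 1
--         else:
--             result += mask[i]
--             i += 1
--     return result
-- ===== SOURCE B (Python) =====
-- def _expand_mask(mask):
--     """The charset lookup in the original keys on two-character strings but is
--     probed with single characters, so it never fires: the function just
--     re-emits every element of mask in order."""
--     return ''.join(mask)
-- ===== Notes on version B (the rewrite author's own statement) =====
-- stated objective: simpler
-- what changed: A's index-driven while loop with repeated string += and a dead charset-dict lookup (a single character can never equal the two-character keys) is replaced by a single ''.join(mask), since A provably re-emits the input unchanged.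
import Mathlib
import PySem

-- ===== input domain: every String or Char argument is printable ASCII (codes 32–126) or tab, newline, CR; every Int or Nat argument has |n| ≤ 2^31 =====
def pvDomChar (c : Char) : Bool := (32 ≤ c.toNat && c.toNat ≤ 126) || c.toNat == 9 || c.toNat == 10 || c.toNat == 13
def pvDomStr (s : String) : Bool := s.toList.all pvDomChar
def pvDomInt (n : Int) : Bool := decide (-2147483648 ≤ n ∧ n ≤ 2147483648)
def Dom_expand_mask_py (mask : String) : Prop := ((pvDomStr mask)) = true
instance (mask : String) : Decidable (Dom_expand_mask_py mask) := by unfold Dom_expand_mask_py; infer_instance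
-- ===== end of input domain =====

-- B replaces A's index-walking while loop (whose charset lookup never matches a
-- single character against the two-character keys) by ''.join(mask): simpler.

-- ===== PORT A =====
-- the charsets dict of A, literal
def pvCharsetsA : PySem.Dict String String :=
  PySem.Dict.ofList
    [("?l", "abcdefghijklmnopqrstuvwxyz"),
     ("?u", "ABCDEFGHIJKLMNOPQRSTUVWXYZ"),
     ("?d", "0123456789"),
     ("?s", "!@#$%^&*()_+-=[]{}|;:,.<>?"),
     ("?a", "abcdefghijklmnopqrstuvwxyzABCDEFGHIJKLMNOPQRSTUVWXYZ0123456789!@#$%^&*()_+-=[]{}|;:,.<>?")]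

-- the while loop over the remaining characters of mask, accumulating result
def pvLoopA : List Char → List Char → List Char
  | acc, [] => acc
  | acc, c :: rest =>
    if c = '?' then
      -- i+1 < len(mask) ↔ rest nonempty
      match rest with
      | [] => pvLoopA (acc ++ [c]) []
      | ct :: rest2 =>
        if (pvCharsetsA.get? (String.ofList [ct])).isSome then
          pvLoopA (acc ++ (pvCharsetsA.getD (String.ofList [ct]) "").toList) rest2
        else
          pvLoopA (acc ++ [c]) (ct :: rest2)
    else
      pvLoopA (acc ++ [c]) rest

def expand_mask_py (mask : String) : String :=
  String.ofList (pvLoopA [] mask.toList)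

-- ===== PORT B =====
def expand_mask_py_alt (mask : String) : String :=
  PySem.Str.join "" (mask.toList.map (fun c => String.ofList [c]))

-- ===== PRECONDITION & SPEC =====
def Spec_expand_mask_py (mask : String) (out : String) : Prop := out = expand_mask_py_alt mask
instance (mask : String) (out : String) : Decidable (Spec_expand_mask_py mask out) := by unfold Spec_expand_mask_py; infer_instance

-- ===== CLAIM (what is proved, stated in full; the proofs are below) =====
def Claim_equal_expand_mask_py : Prop := ∀ (mask : String), Dom_expand_mask_py mask → Spec_expand_mask_py mask (expand_mask_py mask)

-- ===== LEMMAS AND PROOFS =====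

-- a one-character key is never in the charsets dict (all its keys have two characters)
theorem pvCharsets_one_char (ct : Char) : pvCharsetsA.get? (String.ofList [ct]) = none := by
  have hne : ∀ (s : String), s.toList.length = 2 → (s == String.ofList [ct]) = false := by
    intro s hs
    by_contra h
    have : s = String.ofList [ct] := by
      cases hb : (s == String.ofList [ct]) with
      | false => exact absurd hb h
      | true => exact eq_of_beq hb
    rw [this] at hs
    simp at hs
  rw [show pvCharsetsA = PySem.Dict.mk
    [("?l", "abcdefghijklmnopqrstuvwxyz"),
     ("?u", "ABCDEFGHIJKLMNOPQRSTUVWXYZ"),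
     ("?d", "0123456789"),
     ("?s", "!@#$%^&*()_+-=[]{}|;:,.<>?"),
     ("?a", "abcdefghijklmnopqrstuvwxyzABCDEFGHIJKLMNOPQRSTUVWXYZ0123456789!@#$%^&*()_+-=[]{}|;:,.<>?")] from rfl]
  simp [PySem.Dict.get?,
        hne "?l" (by decide), hne "?u" (by decide), hne "?d" (by decide),
        hne "?s" (by decide), hne "?a" (by decide)]

theorem pvLoopA_id (cs acc : List Char) : pvLoopA acc cs = acc ++ cs := by
  induction cs generalizing acc with
  | nil => simp [pvLoopA]
  | cons c rest ih =>
    cases rest with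
    | nil =>
      by_cases h : c = '?' <;> simp [pvLoopA, h]
    | cons ct rest2 =>
      by_cases h : c = '?' <;>
        simp [pvLoopA, h, pvCharsets_one_char ct, ih]

-- ===== VERDICT (by name: the statement is the Claim_ definition above) =====
theorem expand_mask_py_spec : Claim_equal_expand_mask_py := by
  intro mask _
  unfold Spec_expand_mask_py expand_mask_py expand_mask_py_alt
  rw [pvLoopA_id]
  simp [PySem.Str.join]
  rw [show (List.map (String.toList ∘ fun c => String.ofList [c]) mask.toList)
        = mask.toList.map ([·]) by simp [Function.comp]]
  rw [PySem.Chars.join_nil_singletons]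
  exact Eq.symm String.ofList_toList
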